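-- pv_equiv track=rewrite | github.com/idoerr/challenges | adventofcode2023/day14puz2solution.py | tilt_toward_beginning
-- ===== SOURCE A (Python) =====
-- from collections import defaultdict
-- import bisect
--
-- def tilt_toward_beginning( row ):
--     cube_locations = []
--     round_locations = []
--
--     row_len = 0
--
--     #Extract the cube and round locations
--     for i, x in enumerate(row):
--         row_len = i+1
--         if x == '#':
--             cube_locations.append(i)
--         elif x == 'O':
--             round_locations.append(i)
--
--     rounds_behind_cubes = defaultdict(int)
--     # find the nearest cube location, and find how many rounds match that
--     for x in round_locations:
--         cube_index = bisect.bisect(cube_locations, x) - 1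
--         rounds_behind_cubes[cube_index] += 1
--
--     # re-create the new state of the row
--     output_str = ''
--
--     # Start by adding a bunch of rounds that occur before the first cube.
--     start_cube_count = rounds_behind_cubes[-1]
--     output_str += 'O' * start_cube_count
--
--     for cube_index, cube_location in enumerate(cube_locations):
--
--         # Add a bunch of blanks to make fill the cube.
--         if len(output_str) < cube_location:
--             output_str += '.' * (cube_location - len(output_str))
--
--         # Add in the rocks
--         rounds_behind_count = rounds_behind_cubes[cube_index]
--         output_str += '#' + 'O' * rounds_behind_count
--
--     # Pad out the row so that it is the same length as the original.
--     if len(output_str) < row_len: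
--         output_str += '.' * (row_len - len(output_str))
--
--     return tuple(output_str)
-- ===== SOURCE B (Python) =====
-- def tilt_toward_beginning(row):
--     # Per cube-delimited segment, count the round rocks and emit them first,
--     # then the blanks; the '#' separators stay where they were.
--     return tuple('#'.join(
--         'O' * seg.count('O') + '.' * (len(seg) - seg.count('O'))
--         for seg in row.split('#')))
-- ===== Notes on version B (the rewrite author's own statement) =====
-- stated objective: faster
-- what changed: Replaces A's index-lists + bisect + defaultdict row reconstruction with a split at the cube characters that counts the round rocks of each segment and joins the rebuilt segments.
import Mathlib
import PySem

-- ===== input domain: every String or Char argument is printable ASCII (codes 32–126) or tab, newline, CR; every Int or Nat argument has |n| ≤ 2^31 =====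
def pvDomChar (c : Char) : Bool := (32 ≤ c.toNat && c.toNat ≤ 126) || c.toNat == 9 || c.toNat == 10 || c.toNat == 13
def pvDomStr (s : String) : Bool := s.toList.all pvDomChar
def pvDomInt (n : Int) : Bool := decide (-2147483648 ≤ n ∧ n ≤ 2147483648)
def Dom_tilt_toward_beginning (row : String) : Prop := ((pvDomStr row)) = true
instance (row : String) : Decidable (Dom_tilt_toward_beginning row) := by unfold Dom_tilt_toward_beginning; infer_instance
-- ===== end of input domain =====

-- B replaces A's bisect/defaultdict reconstruction by splitting the row at the cubes
-- and rebuilding each segment from its round-rock count (objective: faster, measured).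

-- ===== PORT A =====
-- the enumerate loop extracting cube/round locations and the running row length
def aScanStep (st : List Int × List Int × Int) (p : Int × Char) : List Int × List Int × Int :=
  let rowLen := p.1 + 1
  if p.2 = '#' then (st.1 ++ [p.1], st.2.1, rowLen)
  else if p.2 = 'O' then (st.1, st.2.1 ++ [p.1], rowLen)
  else (st.1, st.2.1, rowLen)

def aScan (l : List Char) : List Int × List Int × Int :=
  (PySem.List.enumerate l).foldl aScanStep ([], [], 0)

-- 'for x in round_locations: rounds_behind_cubes[bisect.bisect(cube_locations, x) - 1] += 1'
-- (bisect.bisect is the library call, ported as PySem.List.bisectRight)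
def aDict (cubes : List Int) (rounds : List Int) : PySem.Dict Int Int :=
  rounds.foldl
    (fun d x => d.modify ((PySem.List.bisectRight cubes x : Int) - 1) 0 (· + 1))
    PySem.Dict.empty

-- the reconstruction loop over enumerate(cube_locations)
def aOutLoop (rbc : PySem.Dict Int Int) (ps : List (Int × Int)) (out : List Char) : List Char :=
  ps.foldl
    (fun out p =>
      let out := if (out.length : Int) < p.2
        then out ++ List.replicate (p.2 - (out.length : Int)).toNat '.' else out
      out ++ '#' :: List.replicate (rbc.getD p.1 0).toNat 'O')
    out

def aCore (l : List Char) : List Char :=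
  let t3 := aScan l
  let cubes := t3.1
  let rounds := t3.2.1
  let rowLen := t3.2.2
  let rbc := aDict cubes rounds
  let out0 := List.replicate (rbc.getD (-1) 0).toNat 'O'
  let out1 := aOutLoop rbc (PySem.List.enumerate cubes) out0
  if (out1.length : Int) < rowLen
    then (out1 ++ List.replicate (rowLen - (out1.length : Int)).toNat '.')
    else out1

def tilt_toward_beginning (row : String) : List String :=
  (aCore row.toList).map (fun c => String.mk [c])

-- ===== PORT B =====
-- single pass; state = (output so far, current segment length, round rocks in segment)
def bStep (st : List Char × Nat × Nat) (ch : Char) : List Char × Nat × Nat :=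
  if ch = '#' then
    (st.1 ++ List.replicate st.2.2 'O' ++ List.replicate (st.2.1 - st.2.2) '.' ++ ['#'], 0, 0)
  else
    (st.1, st.2.1 + 1, if ch = 'O' then st.2.2 + 1 else st.2.2)

def bCore (l : List Char) : List Char :=
  let st := l.foldl bStep ([], 0, 0)
  st.1 ++ List.replicate st.2.2 'O' ++ List.replicate (st.2.1 - st.2.2) '.'

def tilt_toward_beginning_alt (row : String) : List String :=
  (bCore row.toList).map (fun c => String.mk [c])

-- ===== PRECONDITION & SPEC =====
def Spec_tilt_toward_beginning (row : String) (out : List String) : Prop := out = tilt_toward_beginning_alt row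
instance (row : String) (out : List String) : Decidable (Spec_tilt_toward_beginning row out) := by unfold Spec_tilt_toward_beginning; infer_instance

-- ===== CLAIM (what is proved, stated in full; the proofs are below) =====
def Claim_equal_tilt_toward_beginning : Prop := ∀ (row : String), Dom_tilt_toward_beginning row → Spec_tilt_toward_beginning row (tilt_toward_beginning row)

-- ===== LEMMAS AND PROOFS =====

-- the tilted form of one cube-free segment
def tiltSeg (s : List Char) : List Char :=
  List.replicate (s.count 'O') 'O' ++ List.replicate (s.length - s.count 'O') '.'

-- positions (from offset s) of character c in l
def posFrom (c : Char) (s : Int) : List Char → List Int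
  | [] => []
  | x :: xs => if x = c then s :: posFrom c (s + 1) xs else posFrom c (s + 1) xs

lemma posFrom_mem_ge {c : Char} {s x : Int} {l : List Char} (h : x ∈ posFrom c s l) : s ≤ x := by
  induction l generalizing s with
  | nil => simp [posFrom] at h
  | cons y ys ih =>
    by_cases hy : y = c <;> simp [posFrom, hy] at h
    · rcases h with h | h
      · omega
      · have := ih h; omega
    · have := ih h; omega

lemma posFrom_mem_lt {c : Char} {s x : Int} {l : List Char} (h : x ∈ posFrom c s l) : x < s + l.length := by
  induction l generalizing s with
  | nil => simp [posFrom] at h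
  | cons y ys ih =>
    by_cases hy : y = c <;> simp [posFrom, hy] at h <;> simp only [List.length_cons]
    · rcases h with h | h
      · push_cast; omega
      · have := ih h; push_cast at *; omega
    · have := ih h; push_cast at *; omega

lemma posFrom_pairwise (c : Char) (s : Int) (l : List Char) :
    (posFrom c s l).Pairwise (· ≤ ·) := by
  induction l generalizing s with
  | nil => simp [posFrom]
  | cons y ys ih =>
    by_cases hy : y = c <;> simp [posFrom, hy]
    · exact ⟨fun x hx => by have := posFrom_mem_ge hx; omega, ih (s + 1)⟩
    · exact ih (s + 1)

lemma posFrom_length (c : Char) (s : Int) (l : List Char) :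
    (posFrom c s l).length = l.count c := by
  induction l generalizing s with
  | nil => simp [posFrom]
  | cons y ys ih =>
    by_cases hy : y = c <;> simp [posFrom, hy, List.count_cons, ih]

lemma posFrom_shift (c : Char) (s k : Int) (l : List Char) :
    posFrom c (s + k) l = (posFrom c s l).map (· + k) := by
  induction l generalizing s with
  | nil => simp [posFrom]
  | cons y ys ih =>
    by_cases hy : y = c <;> simp [posFrom, hy] <;>
      rw [show s + k + 1 = s + 1 + k by omega, ih]

lemma posFrom_none {c : Char} {s : Int} {l : List Char} (h : c ∉ l) : posFrom c s l = [] := by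
  induction l generalizing s with
  | nil => rfl
  | cons y ys ih =>
    simp at h
    have hy : ¬ y = c := fun hy => h.1 hy.symm
    simp [posFrom, hy, ih h.2]

-- characterization of the extraction loop
lemma aScan_gen (l : List Char) : ∀ (s : Int) (cs rs : List Int) (len0 : Int),
    (PySem.List.enumerate l s).foldl aScanStep (cs, rs, len0)
      = (cs ++ posFrom '#' s l, rs ++ posFrom 'O' s l,
         if l = [] then len0 else s + l.length) := by
  induction l with
  | nil => intro s cs rs len0; simp [PySem.List.enumerate_nil, posFrom]
  | cons x xs ih =>
    intro s cs rs len0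
    rw [PySem.List.enumerate_cons, List.foldl_cons]
    by_cases hx : x = '#'
    · simp only [aScanStep, hx, if_pos rfl, ih]
      simp [posFrom, hx]
      by_cases hxs : xs = [] <;> simp [hxs] <;> push_cast <;> omega
    · by_cases hO : x = 'O'
      · simp only [aScanStep]
        rw [if_neg (by simpa using hx), if_pos (by simpa using hO)]
        simp only [ih]
        simp [posFrom, hx, hO]
        by_cases hxs : xs = [] <;> simp [hxs] <;> push_cast <;> omega
      · simp only [aScanStep]
        rw [if_neg (by simpa using hx), if_neg (by simpa using hO)]
        simp only [ih]
        simp [posFrom, hx, hO]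
        by_cases hxs : xs = [] <;> simp [hxs] <;> push_cast <;> omega

lemma aScan_eq (l : List Char) :
    aScan l = (posFrom '#' 0 l, posFrom 'O' 0 l, (l.length : Int)) := by
  unfold aScan
  rw [aScan_gen]
  by_cases h : l = [] <;> simp [h]

-- bisect on a sorted list counts the elements ≤ x
lemma bisectRight_sorted (xs : List Int) (x : Int) (h : xs.Pairwise (· ≤ ·)) :
    PySem.List.bisectRight xs x = xs.countP (fun y => decide (y ≤ x)) := by
  obtain ⟨hb, hlo, hhi⟩ := PySem.List.bisectRight_spec xs x h
  set b := PySem.List.bisectRight xs x with hbdef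
  have : xs = xs.take b ++ xs.drop b := (List.take_append_drop b xs).symm
  rw [this, List.countP_append]
  have h1 : (xs.take b).countP (fun y => decide (y ≤ x)) = b := by
    rw [List.countP_eq_length.mpr, List.length_take_of_le hb]
    intro y hy
    obtain ⟨i, hi, rfl⟩ := List.mem_iff_getElem.mp hy
    simp only [List.length_take, Nat.lt_min] at hi
    rw [List.getElem_take]
    exact decide_eq_true (hlo i hi.2 hi.1)
  have h2 : (xs.drop b).countP (fun y => decide (y ≤ x)) = 0 := by
    rw [List.countP_eq_zero]
    intro y hy
    obtain ⟨i, hi, rfl⟩ := List.mem_iff_getElem.mp hy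
    simp only [List.length_drop] at hi
    rw [List.getElem_drop]
    simpa using not_le.mpr (hhi (b + i) (by omega) (by omega))
  omega

def keyF (cubes : List Int) (x : Int) : Int := (PySem.List.bisectRight cubes x : Int) - 1

lemma aDict_getD (cubes rounds : List Int) (k : Int) :
    (aDict cubes rounds).getD k 0 = ((rounds.map (keyF cubes)).count k : Int) := by
  unfold aDict
  have hm := List.foldl_map (f := keyF cubes)
    (g := fun (d : PySem.Dict Int Int) (y : Int) => d.modify y 0 (· + 1))
    (l := rounds) (init := PySem.Dict.empty)
  rw [show (fun (d : PySem.Dict Int Int) (x : Int) =>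
        d.modify ((PySem.List.bisectRight cubes x : Int) - 1) 0 (· + 1))
      = (fun (d : PySem.Dict Int Int) (x : Int) =>
          (fun (d : PySem.Dict Int Int) (y : Int) => d.modify y 0 (· + 1)) d (keyF cubes x))
      from rfl]
  rw [← hm, PySem.Dict.getD_foldl_modify_add_one]
  simp [PySem.Dict.getD, PySem.Dict.get?, PySem.Dict.empty]

lemma keyF_ge (cubes : List Int) (x : Int) : -1 ≤ keyF cubes x := by
  unfold keyF; omega

-- B-side fold lemmas
lemma bFold_free (s : List Char) (h : '#' ∉ s) : ∀ (out : List Char) (n r : Nat),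
    s.foldl bStep (out, n, r) = (out, n + s.length, r + s.count 'O') := by
  induction s with
  | nil => intro out n r; simp
  | cons y ys ih =>
    intro out n r
    simp only [List.mem_cons] at h
    push_neg at h
    rw [List.foldl_cons]
    have hy : ¬ y = '#' := fun hy => h.1 hy.symm
    simp only [bStep, if_neg hy]
    rw [ih (fun hm => h.2 hm)]
    by_cases hO : y = 'O' <;> simp [hO, List.count_cons] <;> omega

lemma bFold_prefix (t : List Char) : ∀ (pre out : List Char) (n r : Nat),
    t.foldl bStep (pre ++ out, n, r)
      = (pre ++ (t.foldl bStep (out, n, r)).1, (t.foldl bStep (out, n, r)).2) := by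
  induction t with
  | nil => intro pre out n r; simp
  | cons y ys ih =>
    intro pre out n r
    simp only [List.foldl_cons]
    by_cases hy : y = '#'
    · simp only [bStep, if_pos hy]
      rw [show pre ++ out ++ List.replicate r 'O' ++ List.replicate (n - r) '.' ++ ['#']
            = pre ++ (out ++ List.replicate r 'O' ++ List.replicate (n - r) '.' ++ ['#']) by
          simp [List.append_assoc]]
      exact ih pre _ 0 0
    · simp only [bStep, if_neg hy]
      exact ih pre out (n + 1) _

lemma bFold_prefix' (t : List Char) (pre : List Char) (n r : Nat) :
    t.foldl bStep (pre, n, r)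
      = (pre ++ (t.foldl bStep ([], n, r)).1, (t.foldl bStep ([], n, r)).2) := by
  have := bFold_prefix t pre [] n r
  simpa using this

lemma bCore_free (s : List Char) (h : '#' ∉ s) : bCore s = tiltSeg s := by
  unfold bCore
  rw [show (([], 0, 0) : List Char × Nat × Nat) = (([] : List Char), (0 : Nat), (0 : Nat)) from rfl]
  rw [bFold_free s h]
  simp [tiltSeg]

lemma bCore_rec (s t : List Char) (h : '#' ∉ s) :
    bCore (s ++ '#' :: t) = tiltSeg s ++ '#' :: bCore t := by
  unfold bCore
  rw [List.foldl_append, List.foldl_cons]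
  rw [show (([], 0, 0) : List Char × Nat × Nat) = (([] : List Char), (0 : Nat), (0 : Nat)) from rfl]
  rw [bFold_free s h]
  rw [show bStep ([], 0 + s.length, 0 + s.count 'O') '#' = (tiltSeg s ++ ['#'], 0, 0) by
    simp [bStep, tiltSeg]]
  rw [bFold_prefix']
  simp [List.append_assoc]

-- A-side: the base case (no cube in the row)
lemma aCore_free (l : List Char) (h : '#' ∉ l) : aCore l = tiltSeg l := by
  unfold aCore
  rw [aScan_eq]
  simp only
  rw [posFrom_none h]
  have hkey : ∀ x, keyF ([] : List Int) x = -1 := by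
    intro x
    unfold keyF
    rw [bisectRight_sorted _ _ (by simp)]
    simp
  have hd : (aDict [] (posFrom 'O' 0 l)).getD (-1) 0 = (l.count 'O' : Int) := by
    rw [aDict_getD]
    have : (posFrom 'O' 0 l).map (keyF []) = List.replicate (posFrom 'O' 0 l).length (-1) := by
      rw [show (posFrom 'O' 0 l).length = ((posFrom 'O' 0 l).map (keyF [])).length by simp]
      apply List.eq_replicate_of_mem
      intro y hy
      obtain ⟨x, _, rfl⟩ := List.mem_map.mp hy
      exact hkey x
    rw [this, List.count_replicate_self, posFrom_length]
  rw [hd]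
  simp only [PySem.List.enumerate_nil, aOutLoop, List.foldl_nil]
  have hc : l.count 'O' ≤ l.length := List.count_le_length
  have hlen : (List.replicate ((l.count 'O' : Int)).toNat 'O').length = l.count 'O' := by
    simp
  by_cases hlt : ((List.replicate ((l.count 'O' : Int)).toNat 'O').length : Int) < (l.length : Int)
  · rw [if_pos hlt]
    unfold tiltSeg
    rw [show ((l.count 'O' : Int)).toNat = l.count 'O' by simp]
    rw [show ((l.length : Int) - ((List.replicate (l.count 'O') 'O').length : Int)).toNat
          = l.length - l.count 'O' by simp only [List.length_replicate]; omega]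
  · rw [if_neg hlt]
    rw [hlen] at hlt
    have hEq : l.count 'O' = l.length := by omega
    unfold tiltSeg
    rw [hEq]
    simp

-- enumerate of a mapped list / shifted start
lemma enumerate_map {α β : Type} (g : α → β) (l : List α) (s : Int) :
    PySem.List.enumerate (l.map g) s = (PySem.List.enumerate l s).map (fun p => (p.1, g p.2)) := by
  induction l generalizing s with
  | nil => simp [PySem.List.enumerate_nil]
  | cons x xs ih => simp [PySem.List.enumerate_cons, ih]

lemma enumerate_shift {α : Type} (l : List α) (s k : Int) :
    PySem.List.enumerate l (s + k) = (PySem.List.enumerate l s).map (fun p => (p.1 + k, p.2)) := by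
  induction l generalizing s with
  | nil => simp [PySem.List.enumerate_nil]
  | cons x xs ih =>
    rw [PySem.List.enumerate_cons, PySem.List.enumerate_cons]
    rw [show s + k + 1 = s + 1 + k by omega, ih]
    simp

lemma enumerate_fst_nonneg {α : Type} {l : List α} {p : Int × α}
    (h : p ∈ PySem.List.enumerate l 0) : 0 ≤ p.1 := by
  obtain ⟨k, hk, rfl⟩ := (PySem.List.mem_enumerate_iff _ _ _).mp h
  simp

lemma aOutLoop_cons (d : PySem.Dict Int Int) (p : Int × Int) (ps : List (Int × Int))
    (out : List Char) :
    aOutLoop d (p :: ps) out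
      = aOutLoop d ps
          ((if (out.length : Int) < p.2
            then out ++ List.replicate (p.2 - (out.length : Int)).toNat '.' else out)
           ++ '#' :: List.replicate (d.getD p.1 0).toNat 'O') := rfl

-- the reconstruction loop over shifted cubes with a fixed prefix
lemma aOutLoop_shift (d d' : PySem.Dict Int Int) (M : Int) (hM : 0 ≤ M)
    (ps : List (Int × Int)) (pre : List Char) (hpre : (pre.length : Int) = M)
    (hd : ∀ p ∈ ps, d.getD (p.1 + 1) 0 = d'.getD p.1 0) :
    ∀ out : List Char,
    aOutLoop d (ps.map (fun p => (p.1 + 1, p.2 + M))) (pre ++ out)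
      = pre ++ aOutLoop d' ps out := by
  induction ps with
  | nil => intro out; simp [aOutLoop]
  | cons q qs ih =>
    intro out
    simp only [List.map_cons, aOutLoop, List.foldl_cons]
    have hq : d.getD (q.1 + 1) 0 = d'.getD q.1 0 := hd q (by simp)
    have hcond : (((pre ++ out).length : Int) < q.2 + M) ↔ ((out.length : Int) < q.2) := by
      simp [List.length_append]; omega
    have hpad : (q.2 + M - ((pre ++ out).length : Int)).toNat = (q.2 - (out.length : Int)).toNat := by
      simp [List.length_append]; omega
    by_cases hc : ((out.length : Int) < q.2)
    · rw [if_pos (hcond.mpr hc), if_pos hc, hpad, hq]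
      have := ih (fun p hp => hd p (by simp [hp]))
        (out ++ List.replicate (q.2 - (out.length : Int)).toNat '.'
          ++ '#' :: List.replicate (d'.getD q.1 0).toNat 'O')
      simpa [aOutLoop, List.append_assoc] using this
    · rw [if_neg (fun hh => hc (hcond.mp hh)), if_neg hc, hq]
      have := ih (fun p hp => hd p (by simp [hp]))
        (out ++ '#' :: List.replicate (d'.getD q.1 0).toNat 'O')
      simpa [aOutLoop, List.append_assoc] using this

-- append/sortedness facts used by the recurrence
lemma posFrom_append (c : Char) (s : Int) (u v : List Char) :
    posFrom c s (u ++ v) = posFrom c s u ++ posFrom c (s + u.length) v := by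
  induction u generalizing s with
  | nil => simp [posFrom]
  | cons y ys ih =>
    by_cases hy : y = c <;> simp [posFrom, hy, ih (s + 1)] <;>
      rw [show s + 1 + (ys.length : Int) = s + ((ys.length : Int) + 1) by omega] <;>
      push_cast <;> ring_nf

lemma cubes_pairwise (ct : List Int) (m : Int) (hct : ∀ c ∈ ct, 0 ≤ c)
    (hsort : ct.Pairwise (· ≤ ·)) (hm : 0 ≤ m) :
    (m :: ct.map (· + (m + 1))).Pairwise (· ≤ ·) := by
  rw [List.pairwise_cons]
  constructor
  · intro y hy
    obtain ⟨c, hc, rfl⟩ := List.mem_map.mp hy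
    have := hct c hc; omega
  · exact List.Pairwise.map _ (fun a b hab => by omega) hsort

lemma keyF_low (ct : List Int) (m x : Int) (hct : ∀ c ∈ ct, 0 ≤ c)
    (hsort : ct.Pairwise (· ≤ ·)) (hm : 0 ≤ m) (hx : x < m) :
    keyF (m :: ct.map (· + (m + 1))) x = -1 := by
  unfold keyF
  rw [bisectRight_sorted _ _ (cubes_pairwise ct m hct hsort hm)]
  rw [List.countP_cons_of_neg (by simp; omega)]
  rw [List.countP_map]
  rw [List.countP_eq_zero.mpr (by
    intro c hc
    simp only [Function.comp]
    have := hct c hc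
    simp; omega)]
  simp

lemma keyF_high (ct : List Int) (m x : Int) (hct : ∀ c ∈ ct, 0 ≤ c)
    (hsort : ct.Pairwise (· ≤ ·)) (hm : 0 ≤ m) (hx : 0 ≤ x) :
    keyF (m :: ct.map (· + (m + 1))) (x + (m + 1)) = keyF ct x + 1 := by
  unfold keyF
  rw [bisectRight_sorted _ _ (cubes_pairwise ct m hct hsort hm),
      bisectRight_sorted _ _ hsort]
  rw [List.countP_cons_of_pos (by simp; omega)]
  rw [List.countP_map]
  have : (ct.countP ((fun y => decide (y ≤ x + (m + 1))) ∘ (· + (m + 1))))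
       = ct.countP (fun y => decide (y ≤ x)) := by
    apply List.countP_congr
    intro c hc
    simp only [Function.comp]
    constructor <;> intro hh <;> simp at * <;> omega
  rw [this]
  push_cast
  omega

lemma tiltSeg_length (s : List Char) : (tiltSeg s).length = s.length := by
  have : s.count 'O' ≤ s.length := List.count_le_length
  simp [tiltSeg]
  omega

lemma count_map_add_one (K : List Int) (j : Int) :
    (K.map (· + 1)).count j = K.count (j - 1) := by
  induction K with
  | nil => simp
  | cons a K ih =>
    simp only [List.map_cons, List.count_cons, ih]
    have : ((a + 1 == j)) = ((a == j - 1)) := by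
      by_cases hh : a + 1 = j
      · simp [hh]; omega
      · have : ¬ a = j - 1 := by omega
        simp [hh, this]
    rw [this]

-- A-side recurrence on the first cube
lemma aCore_rec (s t : List Char) (h : '#' ∉ s) :
    aCore (s ++ '#' :: t) = tiltSeg s ++ '#' :: aCore t := by
  have hrle : s.count 'O' ≤ s.length := List.count_le_length
  have htle : t.count 'O' ≤ t.length := List.count_le_length
  have hcubes : posFrom '#' 0 (s ++ '#' :: t)
      = ((s.length : Int) :: (posFrom '#' 0 t).map (· + ((s.length : Int) + 1))) := by
    rw [posFrom_append, posFrom_none h]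
    simp [posFrom]
    rw [show ((s.length : Int) + 1) = 0 + ((s.length : Int) + 1) by omega]
    rw [posFrom_shift]
    simp
  have hrounds : posFrom 'O' 0 (s ++ '#' :: t)
      = posFrom 'O' 0 s ++ (posFrom 'O' 0 t).map (· + ((s.length : Int) + 1)) := by
    rw [posFrom_append]
    congr 1
    have hOs : ¬ ('#' : Char) = 'O' := by decide
    simp [posFrom, hOs]
    rw [show ((s.length : Int) + 1) = 0 + ((s.length : Int) + 1) by omega]
    rw [posFrom_shift]
    simp
  have hct0 : ∀ c ∈ posFrom '#' 0 t, 0 ≤ c := fun c hc => posFrom_mem_ge hc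
  have hctS : (posFrom '#' 0 t).Pairwise (· ≤ ·) := posFrom_pairwise _ _ _
  have hm0 : (0 : Int) ≤ (s.length : Int) := by positivity
  -- the keys the dict is built from
  have hkeys : (posFrom 'O' 0 (s ++ '#' :: t)).map
        (keyF ((s.length : Int) :: (posFrom '#' 0 t).map (· + ((s.length : Int) + 1))))
      = List.replicate (s.count 'O') (-1)
        ++ ((posFrom 'O' 0 t).map (keyF (posFrom '#' 0 t))).map (· + 1) := by
    rw [hrounds, List.map_append]
    congr 1
    · rw [show s.count 'O' = (posFrom 'O' 0 s).length from (posFrom_length _ _ _).symm]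
      rw [show (posFrom 'O' 0 s).length
            = ((posFrom 'O' 0 s).map
                (keyF ((s.length : Int) :: (posFrom '#' 0 t).map (· + ((s.length : Int) + 1))))).length
          by simp]
      apply List.eq_replicate_of_mem
      intro y hy
      obtain ⟨x, hx, rfl⟩ := List.mem_map.mp hy
      have hxlt : x < (s.length : Int) := by
        have := posFrom_mem_lt hx; omega
      exact keyF_low _ _ _ hct0 hctS hm0 hxlt
    · rw [List.map_map, List.map_map]
      apply List.map_congr_left
      intro x hx
      have hx0 : 0 ≤ x := posFrom_mem_ge hx
      simpa using keyF_high _ _ x hct0 hctS hm0 hx0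
  -- dict lookups
  have hKt_ge : ∀ y ∈ (posFrom 'O' 0 t).map (keyF (posFrom '#' 0 t)), -1 ≤ y := by
    intro y hy
    obtain ⟨x, _, rfl⟩ := List.mem_map.mp hy
    exact keyF_ge _ _
  have hg1 : (aDict ((s.length : Int) :: (posFrom '#' 0 t).map (· + ((s.length : Int) + 1)))
        (posFrom 'O' 0 (s ++ '#' :: t))).getD (-1) 0 = (s.count 'O' : Int) := by
    have hz : (-1 : Int) ∉ ((posFrom 'O' 0 t).map (keyF (posFrom '#' 0 t))).map (· + 1) := by
      intro hmem
      obtain ⟨y, hy, hy2⟩ := List.mem_map.mp hmem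
      have := hKt_ge y hy
      omega
    rw [aDict_getD, hkeys, List.count_append, List.count_replicate_self,
        List.count_eq_zero.mpr hz]
    simp
  have hg2 : ∀ j : Int, j ≠ -1 →
      (aDict ((s.length : Int) :: (posFrom '#' 0 t).map (· + ((s.length : Int) + 1)))
        (posFrom 'O' 0 (s ++ '#' :: t))).getD j 0
      = (aDict (posFrom '#' 0 t) (posFrom 'O' 0 t)).getD (j - 1) 0 := by
    intro j hj
    have hz : j ∉ List.replicate (s.count 'O') (-1 : Int) := by
      intro hmem
      have := (List.mem_replicate.mp hmem).2
      omega
    rw [aDict_getD, aDict_getD, hkeys, List.count_append, count_map_add_one,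
        List.count_eq_zero.mpr hz]
    simp
  -- now unfold both sides
  simp only [aCore, aScan_eq]
  rw [hcubes, hg1]
  rw [PySem.List.enumerate_cons]
  rw [show (0 : Int) + 1 = 0 + (1 : Int) from rfl, enumerate_shift, enumerate_map, List.map_map]
  -- first iteration of the output loop
  simp only [aOutLoop_cons]
  rw [show (if ((List.replicate ((s.count 'O' : Int)).toNat 'O').length : Int) < (s.length : Int)
        then List.replicate ((s.count 'O' : Int)).toNat 'O'
          ++ List.replicate ((s.length : Int) - ((List.replicate ((s.count 'O' : Int)).toNat 'O').length : Int)).toNat '.'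
        else List.replicate ((s.count 'O' : Int)).toNat 'O') = tiltSeg s by
      by_cases hr : ((List.replicate ((s.count 'O' : Int)).toNat 'O').length : Int) < (s.length : Int)
      · rw [if_pos hr]
        rw [show ((s.length : Int)
              - ((List.replicate ((s.count 'O' : Int)).toNat 'O').length : Int)).toNat
            = s.length - s.count 'O' by simp only [List.length_replicate]; omega]
        rw [show ((s.count 'O' : Int)).toNat = s.count 'O' by simp]
        rfl
      · rw [if_neg hr]
        simp only [List.length_replicate] at hr
        have hEq : s.count 'O' = s.length := by omega
        unfold tiltSeg
        rw [hEq]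
        simp]
  rw [hg2 0 (by omega)]
  rw [show (0 : Int) - 1 = -1 by omega]
  -- the remaining cubes: shifted loop with a fixed prefix
  have hshift := aOutLoop_shift
    (aDict ((s.length : Int) :: (posFrom '#' 0 t).map (· + ((s.length : Int) + 1)))
      (posFrom 'O' 0 (s ++ '#' :: t)))
    (aDict (posFrom '#' 0 t) (posFrom 'O' 0 t))
    ((s.length : Int) + 1) (by omega)
    (PySem.List.enumerate (posFrom '#' 0 t) 0)
    (tiltSeg s ++ ['#'])
    (by simp [tiltSeg_length])
    (fun p hp => by
      have h0 := enumerate_fst_nonneg hp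
      have := hg2 (p.1 + 1) (by omega)
      simpa using this)
    (List.replicate ((aDict (posFrom '#' 0 t) (posFrom 'O' 0 t)).getD (-1) 0).toNat 'O')
  rw [show ((fun (p : Int × Int) => (p.1 + 1, p.2))
        ∘ (fun (p : Int × Int) => (p.1, p.2 + ((s.length : Int) + 1))))
      = (fun (p : Int × Int) => (p.1 + 1, p.2 + ((s.length : Int) + 1))) from rfl]
  rw [show tiltSeg s ++ '#' :: List.replicate
        ((aDict (posFrom '#' 0 t) (posFrom 'O' 0 t)).getD (-1) 0).toNat 'O'
      = (tiltSeg s ++ ['#']) ++ List.replicate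
        ((aDict (posFrom '#' 0 t) (posFrom 'O' 0 t)).getD (-1) 0).toNat 'O' by
      simp [List.append_assoc]]
  rw [hshift]
  have hlen2 : (((s ++ '#' :: t).length : Nat) : Int)
      = (s.length : Int) + 1 + (t.length : Int) := by
    simp [List.length_append]
    push_cast
    omega
  set O1t := aOutLoop (aDict (posFrom '#' 0 t) (posFrom 'O' 0 t))
    (PySem.List.enumerate (posFrom '#' 0 t) 0)
    (List.replicate ((aDict (posFrom '#' 0 t) (posFrom 'O' 0 t)).getD (-1) 0).toNat 'O') with hO1t
  have hL : ((((tiltSeg s ++ ['#']) ++ O1t).length : Nat) : Int)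
      = (s.length : Int) + 1 + (O1t.length : Int) := by
    simp [tiltSeg_length]
    push_cast
    have : s.count 'O' ≤ s.length := List.count_le_length
    omega
  by_cases hfin : ((O1t.length : Int) < (t.length : Int))
  · rw [if_pos (show ((((tiltSeg s ++ ['#']) ++ O1t).length : Nat) : Int)
          < (((s ++ '#' :: t).length : Nat) : Int) by rw [hL, hlen2]; omega)]
    rw [if_pos hfin]
    rw [show ((((s ++ '#' :: t).length : Nat) : Int)
          - ((((tiltSeg s ++ ['#']) ++ O1t).length : Nat) : Int)).toNat
        = ((t.length : Int) - ((O1t.length : Nat) : Int)).toNat by rw [hL, hlen2]; omega]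
    simp [List.append_assoc]
  · rw [if_neg (show ¬ ((((tiltSeg s ++ ['#']) ++ O1t).length : Nat) : Int)
          < (((s ++ '#' :: t).length : Nat) : Int) by rw [hL, hlen2]; omega)]
    rw [if_neg hfin]
    simp [List.append_assoc]

lemma exists_first_cube (l : List Char) (h : '#' ∈ l) :
    ∃ s t, l = s ++ '#' :: t ∧ '#' ∉ s := by
  induction l with
  | nil => simp at h
  | cons y ys ih =>
    by_cases hy : y = '#'
    · exact ⟨[], ys, by simp [hy], by simp⟩
    · have : '#' ∈ ys := by
        rcases List.mem_cons.mp h with h1 | h1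
        · exact absurd h1.symm hy
        · exact h1
      obtain ⟨s, t, rfl, hs⟩ := ih this
      refine ⟨y :: s, t, rfl, fun hm => ?_⟩
      rcases List.mem_cons.mp hm with h1 | h1
      · exact hy h1.symm
      · exact hs h1

lemma core_eq (l : List Char) : aCore l = bCore l := by
  induction hn : l.length using Nat.strong_induction_on generalizing l with
  | _ n ih =>
    by_cases h : '#' ∈ l
    · obtain ⟨s, t, rfl, hs⟩ := exists_first_cube l h
      rw [aCore_rec s t hs, bCore_rec s t hs]
      have ht : t.length < n := by subst hn; simp; omega
      rw [ih t.length ht t rfl]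
    · rw [aCore_free l h, bCore_free l h]

-- ===== VERDICT (by name: the statement is the Claim_ definition above) =====
theorem tilt_toward_beginning_spec : Claim_equal_tilt_toward_beginning := by
  intro row _
  unfold Spec_tilt_toward_beginning tilt_toward_beginning tilt_toward_beginning_alt
  rw [core_eq]
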